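-- pv_equiv track=rewrite | github.com/Creariax5/trackCrypto | collectors/extract_transactions.py | merge_transaction_data
-- ===== SOURCE A (Python) =====
-- def merge_transaction_data(json_data, table_data):
--     """Merge JSON and table data - handles duplicate hashes better"""
--     merged = []
--
--     # Group JSON data by hash (handle multiple entries per hash)
--     json_by_hash = {}
--     for tx in json_data:
--         # Clean hash (remove 0x0x prefix if present)
--         hash_key = tx.get('Hash', '').replace('0x0x', '0x')
--         if hash_key not in json_by_hash:
--             json_by_hash[hash_key] = []
--         json_by_hash[hash_key].append(tx)
--
--     for table_tx in table_data:
--         # Clean hash for lookup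
--         hash_key = table_tx.get('transaction_hash', '').replace('0x0x', '0x')
--
--         # Start with table data (more detailed)
--         merged_tx = table_tx.copy()
--
--         # Add JSON data if available
--         if hash_key in json_by_hash:
--             json_transactions = json_by_hash[hash_key]
--
--             # If multiple JSON entries for same hash, try to match by token or other criteria
--             matched_json = None
--             table_token = table_tx.get('token_symbol', '').upper()
--
--             for json_tx in json_transactions:
--                 json_token = json_tx.get('Token', '')
--                 if table_token and table_token in json_token.upper():
--                     matched_json = json_tx
--                     break
--
--             # If no token match, use first JSON entry
--             if not matched_json and json_transactions:
--                 matched_json = json_transactions[0]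
--
--             if matched_json:
--                 for key, value in matched_json.items():
--                     # Use json_ prefix for JSON-specific fields to avoid conflicts
--                     merged_tx[f'json_{key.lower().replace(" ", "_")}'] = value
--
--         merged.append(merged_tx)
--
--     return merged
-- ===== SOURCE B (Python) =====
-- def _merge_row(json_data, table_tx):
--     hk = table_tx.get('transaction_hash', '').replace('0x0x', '0x')
--     token = table_tx.get('token_symbol', '').upper()
--     chosen = None
--     for jt in json_data:
--         if jt.get('Hash', '').replace('0x0x', '0x') == hk:
--             if token and token in jt.get('Token', '').upper():
--                 chosen = jt
--                 break
--             if chosen is None: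
--                 chosen = jt
--     merged_tx = dict(table_tx)
--     if chosen:
--         for key, value in chosen.items():
--             merged_tx['json_' + key.lower().replace(' ', '_')] = value
--     return merged_tx
--
--
-- def merge_transaction_data(json_data, table_data):
--     """Merge JSON and table data - handles duplicate hashes better"""
--     return [_merge_row(json_data, t) for t in table_data]
-- ===== Notes on version B (the rewrite author's own statement) =====
-- stated objective: simpler
-- what changed: Drops the json_by_hash grouping dict entirely: each table row does one direct in-order scan of json_data that remembers the first hash match and breaks on the first token match, then applies the same json_-prefixed merge.
import Mathlib
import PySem

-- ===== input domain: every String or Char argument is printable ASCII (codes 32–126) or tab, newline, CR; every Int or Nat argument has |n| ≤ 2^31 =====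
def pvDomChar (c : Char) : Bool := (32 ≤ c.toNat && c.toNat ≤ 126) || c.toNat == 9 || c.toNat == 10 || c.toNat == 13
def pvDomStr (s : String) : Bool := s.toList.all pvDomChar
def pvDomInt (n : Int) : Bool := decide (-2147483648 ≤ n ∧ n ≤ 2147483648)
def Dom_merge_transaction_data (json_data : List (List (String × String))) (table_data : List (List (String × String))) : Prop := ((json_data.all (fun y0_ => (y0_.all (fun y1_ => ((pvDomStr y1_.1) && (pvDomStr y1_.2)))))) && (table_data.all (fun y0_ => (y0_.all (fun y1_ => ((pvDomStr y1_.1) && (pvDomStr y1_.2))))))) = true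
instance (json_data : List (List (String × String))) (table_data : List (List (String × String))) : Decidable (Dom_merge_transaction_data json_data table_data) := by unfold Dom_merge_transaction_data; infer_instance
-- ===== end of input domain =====

-- B drops A's json_by_hash grouping dict: each table row directly scans json_data once,
-- remembering the first hash match and breaking on the first token match (objective: simpler).

-- ===== shared primitives (the identical Python idioms both versions use) =====
-- tx.get(k, dflt) on a dict rendered as an association list (unique keys: first match)
def pvGetD (tx : List (String × String)) (k dflt : String) : String :=
  match tx.find? (fun p => p.1 == k) with
  | some p => p.2
  | none => dflt

-- s.replace('0x0x', '0x')
def pvCleanHash (s : String) : String := PySem.Str.replace s "0x0x" "0x"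

-- 'json_' + key.lower().replace(' ', '_')
def pvJsonKey (k : String) : String := "json_" ++ PySem.Str.replace (PySem.Str.lower k) " " "_"

-- merged_tx[k] = v  (dict assignment: overwrite in place, new keys append)
def pvSetItem (d : List (String × String)) (k v : String) : List (String × String) :=
  if d.any (fun p => p.1 == k) then d.map (fun p => if p.1 == k then (k, v) else p)
  else d ++ [(k, v)]

-- for key, value in matched_json.items(): merged_tx['json_' + …] = value
def pvMergeInto (m t : List (String × String)) : List (String × String) :=
  m.foldl (fun acc kv => pvSetItem acc (pvJsonKey kv.1) kv.2) t

-- ===== PORT A =====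
-- body of A's second loop, given the prebuilt json_by_hash index
def pvRowA (json_by_hash : PySem.Dict String (List (List (String × String))))
    (table_tx : List (String × String)) : List (String × String) :=
  let hash_key := pvCleanHash (pvGetD table_tx "transaction_hash" "")
  let merged_tx := table_tx
  if json_by_hash.contains hash_key then
    let json_transactions := json_by_hash.getD hash_key []
    let table_token := PySem.Str.upper (pvGetD table_tx "token_symbol" "")
    let matched := json_transactions.find? (fun jt =>
      (table_token != "") && PySem.Str.isIn table_token (PySem.Str.upper (pvGetD jt "Token" "")))
    let matched := if matched.getD [] = [] ∧ json_transactions ≠ [] then json_transactions.head? else matched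
    match matched with
    | some m => if m = [] then merged_tx else pvMergeInto m merged_tx
    | none => merged_tx
  else merged_tx

def merge_transaction_data (json_data : List (List (String × String))) (table_data : List (List (String × String))) : List (List (String × String)) :=
  let json_by_hash : PySem.Dict String (List (List (String × String))) :=
    json_data.foldl (fun d tx =>
      let hash_key := pvCleanHash (pvGetD tx "Hash" "")
      let d := if d.contains hash_key then d else d.insert hash_key []
      d.modify hash_key [] (fun g => g ++ [tx])) PySem.Dict.empty
  table_data.foldl (fun merged table_tx => merged ++ [pvRowA json_by_hash table_tx]) []

-- ===== PORT B =====
-- the in-order scan: first hash match is remembered, first token match breaks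
def pvScan (hk token : String) :
    List (List (String × String)) → Option (List (String × String)) → Option (List (String × String))
  | [], chosen => chosen
  | jt :: rest, chosen =>
    if pvCleanHash (pvGetD jt "Hash" "") == hk then
      if (token != "") && PySem.Str.isIn token (PySem.Str.upper (pvGetD jt "Token" "")) then some jt
      else pvScan hk token rest (some (chosen.getD jt))
    else pvScan hk token rest chosen

def pvRowB (json_data : List (List (String × String)))
    (table_tx : List (String × String)) : List (String × String) :=
  let hk := pvCleanHash (pvGetD table_tx "transaction_hash" "")
  let token := PySem.Str.upper (pvGetD table_tx "token_symbol" "")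
  match pvScan hk token json_data none with
  | none => table_tx
  | some m => if m = [] then table_tx else pvMergeInto m table_tx

def merge_transaction_data_alt (json_data : List (List (String × String))) (table_data : List (List (String × String))) : List (List (String × String)) :=
  table_data.map (pvRowB json_data)

-- ===== PRECONDITION & SPEC =====
def Spec_merge_transaction_data (json_data : List (List (String × String))) (table_data : List (List (String × String))) (out : List (List (String × String))) : Prop := out = merge_transaction_data_alt json_data table_data
instance (json_data : List (List (String × String))) (table_data : List (List (String × String))) (out : List (List (String × String))) : Decidable (Spec_merge_transaction_data json_data table_data out) := by unfold Spec_merge_transaction_data; infer_instance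

-- ===== CLAIM (what is proved, stated in full; the proofs are below) =====
def Claim_equal_merge_transaction_data : Prop := ∀ (json_data : List (List (String × String))) (table_data : List (List (String × String))), Dom_merge_transaction_data json_data table_data → Spec_merge_transaction_data json_data table_data (merge_transaction_data json_data table_data)

-- ===== LEMMAS AND PROOFS =====

-- the grouping fold's guarded step is a plain modify
lemma pv_step_eq_modify (d : PySem.Dict String (List (List (String × String))))
    (k : String) (tx : List (String × String)) :
    (if d.contains k then d else d.insert k []).modify k [] (fun g => g ++ [tx]) =
      d.modify k [] (fun g => g ++ [tx]) := by
  by_cases h : d.contains k = true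
  · simp [h]
  · rw [Bool.not_eq_true] at h
    have hg : d.get? k = none := (PySem.Dict.get?_eq_none_iff_contains d k).mpr h
    simp only [PySem.Dict.modify, PySem.Dict.getD_eq_get?_getD, h, Bool.false_eq_true, if_false,
      PySem.Dict.get?_insert_self, PySem.Dict.insert_insert_self, hg, Option.getD_some,
      Option.getD_none]

-- the key under which a json tx is grouped
def pvKey (tx : List (String × String)) : String := pvCleanHash (pvGetD tx "Hash" "")

lemma pv_group_eq (json_data : List (List (String × String))) :
    json_data.foldl (fun d tx =>
        let hash_key := pvCleanHash (pvGetD tx "Hash" "")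
        let d := if d.contains hash_key then d else d.insert hash_key []
        d.modify hash_key [] (fun g => g ++ [tx])) PySem.Dict.empty =
      json_data.foldl (fun d tx => d.modify (pvKey tx) [] (fun g => g ++ [tx])) PySem.Dict.empty := by
  apply PySem.List.foldl_congr_mem
  intro d tx _
  simpa [pvKey] using pv_step_eq_modify d (pvCleanHash (pvGetD tx "Hash" "")) tx

lemma pv_group_getD (json_data : List (List (String × String))) (hk : String) :
    (json_data.foldl (fun d tx => d.modify (pvKey tx) [] (fun g => g ++ [tx]))
        PySem.Dict.empty).getD hk [] =
      json_data.filter (fun tx => pvKey tx == hk) := by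
  have h := PySem.Dict.getD_foldl_modify_append
    (json_data.map (fun tx => (pvKey tx, tx))) PySem.Dict.empty hk
  rw [List.foldl_map, List.filter_map] at h
  simpa [Function.comp_def] using h

lemma pv_group_contains (json_data : List (List (String × String))) (hk : String) :
    (json_data.foldl (fun d tx => d.modify (pvKey tx) [] (fun g => g ++ [tx]))
        PySem.Dict.empty).contains hk = true ↔ hk ∈ json_data.map pvKey := by
  rw [PySem.Dict.contains_iff_mem_keys,
    PySem.Dict.keys_foldl_modify_key json_data pvKey [] (fun _ tx g => g ++ [tx])]
  simp [PySem.Set.update_nil_left, PySem.Set.mem_ofList, PySem.Dict.keys_empty]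

-- an empty json dict never token-matches
lemma pv_tok_nil (token : String) :
    ((token != "") && PySem.Str.isIn token (PySem.Str.upper (pvGetD [] "Token" ""))) = false := by
  by_cases h : token = ""
  · simp [h]
  · have h0 : pvGetD [] "Token" "" = "" := rfl
    rw [h0]
    have hu : PySem.Str.upper "" = "" := rfl
    rw [hu]
    cases hin : PySem.Str.isIn token "" with
    | false => simp
    | true =>
      exfalso
      have h1 := (PySem.Str.isIn_iff_infix token "").mp hin
      have h2 : token.toList = [] := List.eq_nil_of_infix_nil h1
      exact h (by have h3 := congrArg String.ofList h2; rwa [String.ofList_toList] at h3)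

-- what B's scan computes: first token match, else the carried value, else first hash match
lemma pv_scan_eq (hk token : String) (l : List (List (String × String)))
    (chosen : Option (List (String × String))) :
    pvScan hk token l chosen =
      ((l.find? (fun jt => (pvCleanHash (pvGetD jt "Hash" "") == hk) &&
          ((token != "") && PySem.Str.isIn token (PySem.Str.upper (pvGetD jt "Token" ""))))).or
        (chosen.or (l.find? (fun jt => pvCleanHash (pvGetD jt "Hash" "") == hk)))) := by
  induction l generalizing chosen with
  | nil => simp [pvScan]
  | cons jt rest ih =>
    rw [pvScan]
    by_cases hh : (pvCleanHash (pvGetD jt "Hash" "") == hk) = true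
    · rw [if_pos hh]
      by_cases ht : ((token != "") && PySem.Str.isIn token (PySem.Str.upper (pvGetD jt "Token" ""))) = true
      · rw [if_pos ht, List.find?_cons_of_pos
          (p := fun jt => (pvCleanHash (pvGetD jt "Hash" "") == hk) &&
            ((token != "") && PySem.Str.isIn token (PySem.Str.upper (pvGetD jt "Token" ""))))
          (by simp [hh]; simpa using ht)]
        simp
      · have ht' : ((token != "") && PySem.Str.isIn token (PySem.Str.upper (pvGetD jt "Token" ""))) = false :=
          Bool.not_eq_true _ ▸ ht
        rw [if_neg ht, ih, List.find?_cons_of_neg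
          (p := fun jt => (pvCleanHash (pvGetD jt "Hash" "") == hk) &&
            ((token != "") && PySem.Str.isIn token (PySem.Str.upper (pvGetD jt "Token" ""))))
          (by simp [hh]; simpa using ht'),
          List.find?_cons_of_pos (p := fun jt => pvCleanHash (pvGetD jt "Hash" "") == hk) hh]
        cases chosen <;> simp
    · have hh' : (pvCleanHash (pvGetD jt "Hash" "") == hk) = false := Bool.not_eq_true _ ▸ hh
      rw [if_neg hh, ih, List.find?_cons_of_neg
        (p := fun jt => (pvCleanHash (pvGetD jt "Hash" "") == hk) &&
          ((token != "") && PySem.Str.isIn token (PySem.Str.upper (pvGetD jt "Token" ""))))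
        (by simp [hh']),
        List.find?_cons_of_neg (p := fun jt => pvCleanHash (pvGetD jt "Hash" "") == hk) (by simp [hh'])]

-- per-row agreement
lemma pv_row_eq (json_data : List (List (String × String))) (table_tx : List (String × String)) :
    pvRowA (json_data.foldl (fun d tx => d.modify (pvKey tx) [] (fun g => g ++ [tx]))
        PySem.Dict.empty) table_tx = pvRowB json_data table_tx := by
  simp only [pvRowA, pvRowB]
  rw [pv_scan_eq]
  set hk := pvCleanHash (pvGetD table_tx "transaction_hash" "") with hhk
  set token := PySem.Str.upper (pvGetD table_tx "token_symbol" "") with htok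
  set tokP : List (String × String) → Bool := fun jt =>
    (token != "") && PySem.Str.isIn token (PySem.Str.upper (pvGetD jt "Token" "")) with htokP
  set jbh := json_data.foldl (fun d tx => d.modify (pvKey tx) [] (fun g => g ++ [tx]))
    PySem.Dict.empty with hjbh
  have hfilter : List.find? tokP (json_data.filter (fun tx => pvKey tx == hk)) =
      json_data.find? (fun jt => (pvCleanHash (pvGetD jt "Hash" "") == hk) && tokP jt) := by
    rw [List.find?_filter]
    congr 1
    funext a
    cases h1 : pvKey a == hk with
    | true => cases h2 : tokP a <;> simp_all [pvKey]
    | false => simp_all [pvKey]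
  by_cases hc : jbh.contains hk = true
  · rw [if_pos hc, pv_group_getD json_data hk, hfilter]
    have hne : json_data.filter (fun tx => pvKey tx == hk) ≠ [] := by
      intro hnil
      obtain ⟨tx, htx, hkey⟩ := List.mem_map.mp ((pv_group_contains json_data hk).mp hc)
      have := List.filter_eq_nil_iff.mp hnil tx htx
      simp [hkey] at this
    cases hfind : json_data.find? (fun jt => (pvCleanHash (pvGetD jt "Hash" "") == hk) && tokP jt) with
    | some m =>
      have hm := List.find?_some hfind
      have hmne : m ≠ [] := by
        intro hmnil
        have h2 : tokP m = true := (Bool.and_eq_true _ _ |>.mp hm).2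
        have h3 : tokP [] = false := pv_tok_nil token
        rw [hmnil, h3] at h2
        exact Bool.false_ne_true h2
      rw [if_neg (by simp [hmne])]
      simp [hmne]
    | none =>
      obtain ⟨j, rest, hjrest⟩ := List.exists_cons_of_ne_nil hne
      have hhead : (json_data.filter (fun tx => pvKey tx == hk)).head? = some j := by
        rw [hjrest]; rfl
      have hfindhash : json_data.find? (fun jt => pvCleanHash (pvGetD jt "Hash" "") == hk) = some j := by
        rw [← List.head?_filter]
        rw [show (fun jt => pvCleanHash (pvGetD jt "Hash" "") == hk) = fun tx => pvKey tx == hk from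
          by funext a; rw [pvKey], hhead]
      rw [if_pos ⟨rfl, hne⟩, hhead, hfindhash]
      simp
  · have hc' : jbh.contains hk = false := Bool.not_eq_true _ ▸ hc
    rw [if_neg (by simp [hc'])]
    have hall : ∀ jt ∈ json_data, ¬(pvCleanHash (pvGetD jt "Hash" "") == hk) = true := by
      intro jt hjt hbeq
      exact hc (by
        rw [hjbh, pv_group_contains json_data hk]
        exact List.mem_map.mpr ⟨jt, hjt, by simpa [pvKey] using hbeq⟩)
    have h1 : json_data.find? (fun jt => pvCleanHash (pvGetD jt "Hash" "") == hk) = none :=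
      List.find?_eq_none.mpr hall
    have h2 : json_data.find? (fun jt => (pvCleanHash (pvGetD jt "Hash" "") == hk) && tokP jt) = none :=
      List.find?_eq_none.mpr (fun jt hjt => by
        have h3 := hall jt hjt
        cases h : pvCleanHash (pvGetD jt "Hash" "") == hk <;> simp_all)
    rw [h1, h2]
    rfl

-- ===== VERDICT (by name: the statement is the Claim_ definition above) =====
theorem merge_transaction_data_spec : Claim_equal_merge_transaction_data := by
  intro json_data table_data _
  unfold Spec_merge_transaction_data
  simp only [merge_transaction_data, merge_transaction_data_alt]
  rw [pv_group_eq]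
  rw [PySem.List.foldl_append_singleton_eq_map (pvRowA _) table_data []]
  simp only [List.nil_append]
  exact List.map_congr_left (fun tx _ => pv_row_eq json_data tx)
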